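-- pv_equiv track=rewrite | github.com/Bishibop/slatec90 | parse_tree.py | create_status_mapping
-- ===== SOURCE A (Python) =====
-- from typing import Dict, List, Set, Tuple
--
-- def create_status_mapping(all_functions: Set[str], available_functions: Set[str]) -> Dict[str, str]:
--     """
--     Create a status mapping for functions based on completion status.
--     """
--     # Functions that have been completed according to the gitStatus
--     completed = {
--         'PYTHAG', 'CDIV', 'I1MACH', 'R1MACH', 'D1MACH', 'ENORM', 'LSAME',
--         'ZABS', 'DENORM'  # Adding ZABS and DENORM from recent commits
--     }
--
--     # Functions currently in progress
--     in_progress = set()  # None explicitly mentioned as in-progress currently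
--
--     status_map = {}
--
--     for func in all_functions:
--         if func in completed:
--             status_map[func] = 'completed'
--         elif func in in_progress:
--             status_map[func] = 'in_progress'
--         elif func in available_functions:
--             status_map[func] = 'available'
--         else:
--             status_map[func] = 'not_available'
--
--     return status_map
-- ===== SOURCE B (Python) =====
-- COMPLETED = {
--     'PYTHAG', 'CDIV', 'I1MACH', 'R1MACH', 'D1MACH', 'ENORM', 'LSAME',
--     'ZABS', 'DENORM'
-- }
--
-- def create_status_mapping(all_functions, available_functions):
--     # Layered overwrites instead of a per-element if/elif cascade:
--     # default everything to 'not_available', then overwrite the available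
--     # ones, then overwrite the completed ones (completed wins).  Dict
--     # overwrite keeps key positions, so key order is unchanged.
--     status_map = {func: 'not_available' for func in all_functions}
--     for func in available_functions:
--         if func in status_map:
--             status_map[func] = 'available'
--     for func in COMPLETED:
--         if func in status_map:
--             status_map[func] = 'completed'
--     return status_map
-- ===== Notes on version B (the rewrite author's own statement) =====
-- stated objective: alternative
-- what changed: Replaces the per-element if/elif membership cascade by three layered passes: initialise every function to 'not_available', then overwrite entries present in available_functions, then overwrite entries in the completed set, relying on dict overwrite keeping key positions and on completed-last giving it priority.
import Mathlib
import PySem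

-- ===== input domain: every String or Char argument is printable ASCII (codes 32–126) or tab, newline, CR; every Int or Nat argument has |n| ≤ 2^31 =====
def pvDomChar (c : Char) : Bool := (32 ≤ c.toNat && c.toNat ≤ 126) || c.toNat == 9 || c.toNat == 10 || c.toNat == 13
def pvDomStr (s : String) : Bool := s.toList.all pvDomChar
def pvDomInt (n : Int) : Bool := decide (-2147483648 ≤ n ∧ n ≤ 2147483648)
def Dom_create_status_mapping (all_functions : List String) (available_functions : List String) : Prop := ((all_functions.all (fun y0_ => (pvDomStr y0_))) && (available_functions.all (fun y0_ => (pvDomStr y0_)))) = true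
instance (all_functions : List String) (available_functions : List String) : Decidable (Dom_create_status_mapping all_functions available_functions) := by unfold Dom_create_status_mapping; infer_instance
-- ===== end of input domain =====

-- B replaces A's per-element if/elif cascade by three layered overwrite passes
-- (default 'not_available', then 'available', then 'completed'); same cost, different decomposition.

-- the literal set of completed functions (shared constant of both Pythons' modules)
def pvCompleted : List String :=
  ["PYTHAG", "CDIV", "I1MACH", "R1MACH", "D1MACH", "ENORM", "LSAME", "ZABS", "DENORM"]

-- ===== PORT A =====
def create_status_mapping (all_functions : List String) (available_functions : List String) : List (String × String) :=
  let completed : PySem.Set String := PySem.Set.ofList pvCompleted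
  let in_progress : PySem.Set String := PySem.Set.ofList []
  let status_map : PySem.Dict String String :=
    all_functions.foldl (fun sm func =>
      if PySem.Set.contains completed func then sm.insert func "completed"
      else if PySem.Set.contains in_progress func then sm.insert func "in_progress"
      else if PySem.Set.contains available_functions func then sm.insert func "available"
      else sm.insert func "not_available") PySem.Dict.empty
  status_map.items

-- ===== PORT B =====
def create_status_mapping_alt (all_functions : List String) (available_functions : List String) : List (String × String) :=
  let status0 : PySem.Dict String String :=
    all_functions.foldl (fun sm func => sm.insert func "not_available") PySem.Dict.empty
  let status1 : PySem.Dict String String :=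
    available_functions.foldl (fun sm func =>
      if sm.contains func then sm.insert func "available" else sm) status0
  let status2 : PySem.Dict String String :=
    (PySem.Set.ofList pvCompleted).foldl (fun sm func =>
      if sm.contains func then sm.insert func "completed" else sm) status1
  status2.items

-- ===== PRECONDITION & SPEC =====
def Spec_create_status_mapping (all_functions : List String) (available_functions : List String) (out : List (String × String)) : Prop := out = create_status_mapping_alt all_functions available_functions
instance (all_functions : List String) (available_functions : List String) (out : List (String × String)) : Decidable (Spec_create_status_mapping all_functions available_functions out) := by unfold Spec_create_status_mapping; infer_instance

-- ===== CLAIM (what is proved, stated in full; the proofs are below) =====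
def Claim_equal_create_status_mapping : Prop := ∀ (all_functions : List String) (available_functions : List String), Dom_create_status_mapping all_functions available_functions → Spec_create_status_mapping all_functions available_functions (create_status_mapping all_functions available_functions)

-- ===== LEMMAS AND PROOFS =====

-- the classification value A assigns to a function name
def pvVal (ab : List String) (f : String) : String :=
  if f ∈ pvCompleted then "completed"
  else if f ∈ ab then "available" else "not_available"

-- the conditional-overwrite step of B's two update loops
def pvUpd (v : String) (sm : PySem.Dict String String) (f : String) : PySem.Dict String String :=
  if sm.contains f then sm.insert f v else sm

-- a fold of inserts whose value depends only on the key: getD characterisation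
theorem getD_foldl_insert_fun (g : String → String) (L : List String)
    (d : PySem.Dict String String) (k : String) :
    (L.foldl (fun sm f => sm.insert f (g f)) d).getD k "" =
      if k ∈ L then g k else d.getD k "" := by
  induction L generalizing d with
  | nil => simp
  | cons a rest ih =>
    simp only [List.foldl_cons, ih, PySem.Dict.getD_insert, List.mem_cons]
    by_cases hka : k = a <;> by_cases hkr : k ∈ rest <;> simp [hka, hkr]

theorem keys_pvUpd_foldl (v : String) (L : List String) (d : PySem.Dict String String) :
    (L.foldl (pvUpd v) d).keys = d.keys := by
  induction L generalizing d with
  | nil => rfl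
  | cons a rest ih =>
    simp only [List.foldl_cons, ih]
    unfold pvUpd
    by_cases h : d.contains a = true
    · simp [h, PySem.Dict.keys_insert_of_contains _ _ h]
    · simp [h]

theorem contains_pvUpd_foldl (v : String) (L : List String) (d : PySem.Dict String String)
    (k : String) : (L.foldl (pvUpd v) d).contains k = d.contains k := by
  simp [PySem.Dict.contains_eq_decide_mem_keys, keys_pvUpd_foldl]

theorem getD_pvUpd_foldl (v : String) (L : List String) (d : PySem.Dict String String)
    (k : String) :
    (L.foldl (pvUpd v) d).getD k "" =
      if k ∈ L ∧ d.contains k = true then v else d.getD k "" := by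
  induction L generalizing d with
  | nil => simp
  | cons a rest ih =>
    simp only [List.foldl_cons, ih, List.mem_cons]
    have hc : (pvUpd v d a).contains k = d.contains k := by
      unfold pvUpd
      by_cases h : d.contains a = true
      · simp only [h, if_true, PySem.Dict.contains_insert]
        by_cases hka : k = a <;> simp [hka, h]
      · simp [h]
    have hg : (pvUpd v d a).getD k "" =
        if k = a ∧ d.contains k = true then v else d.getD k "" := by
      unfold pvUpd
      by_cases h : d.contains a = true
      · simp only [h, if_true, PySem.Dict.getD_insert]
        by_cases hka : k = a <;> simp [hka, h]
      · have : ¬ (k = a ∧ d.contains k = true) := by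
          rintro ⟨rfl, hk⟩; exact h hk
        simp [h, this]
    rw [hc, hg]
    by_cases hkr : k ∈ rest <;> by_cases hka : k = a <;>
      by_cases hdk : d.contains k = true <;> simp_all

-- A's fold IS an insert-fold with value function pvVal
theorem stepA_eq (ab : List String) :
    (fun (sm : PySem.Dict String String) func =>
      if PySem.Set.contains (PySem.Set.ofList pvCompleted) func then sm.insert func "completed"
      else if PySem.Set.contains (PySem.Set.ofList ([] : List String)) func then sm.insert func "in_progress"
      else if PySem.Set.contains ab func then sm.insert func "available"
      else sm.insert func "not_available") =
    (fun sm func => sm.insert func (pvVal ab func)) := by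
  funext sm func
  simp only [pvVal, PySem.Set.contains_eq_listContains, List.contains_eq_mem,
    PySem.Set.ofList_nil, decide_eq_true_eq, List.not_mem_nil, if_false,
    PySem.Set.mem_ofList]
  by_cases h1 : func ∈ pvCompleted <;> by_cases h2 : func ∈ ab <;> simp [h1, h2]

theorem keysA (all ab : List String) :
    (all.foldl (fun sm func => sm.insert func (pvVal ab func)) PySem.Dict.empty).keys
      = PySem.Set.ofList all := by
  rw [PySem.Dict.keys_foldl_insert]
  simp [PySem.Dict.keys_empty, PySem.Set.update_nil_left]

theorem keysB0 (all : List String) :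
    (all.foldl (fun sm func => sm.insert func "not_available")
        (PySem.Dict.empty : PySem.Dict String String)).keys = PySem.Set.ofList all := by
  rw [PySem.Dict.keys_foldl_insert]
  simp [PySem.Dict.keys_empty, PySem.Set.update_nil_left]

theorem create_status_mapping_spec : Claim_equal_create_status_mapping := by
  intro all ab _
  unfold Spec_create_status_mapping create_status_mapping create_status_mapping_alt
  simp only [stepA_eq]
  have hfold : ∀ v : String,
      (fun (sm : PySem.Dict String String) func =>
        if sm.contains func then sm.insert func v else sm) = pvUpd v := fun _ => rfl
  simp only [hfold]
  set dA := all.foldl (fun sm func => sm.insert func (pvVal ab func)) PySem.Dict.empty with hdA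
  set d0 := all.foldl (fun sm func => sm.insert func "not_available")
      (PySem.Dict.empty : PySem.Dict String String) with hd0
  set d1 := ab.foldl (pvUpd "available") d0 with hd1
  set d2 := (PySem.Set.ofList pvCompleted).foldl (pvUpd "completed") d1 with hd2
  -- keys agree
  have hkA : dA.keys = PySem.Set.ofList all := keysA all ab
  have hk0 : d0.keys = PySem.Set.ofList all := keysB0 all
  have hk1 : d1.keys = PySem.Set.ofList all := by rw [hd1, keys_pvUpd_foldl, hk0]
  have hk2 : d2.keys = PySem.Set.ofList all := by rw [hd2, keys_pvUpd_foldl, hk1]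
  -- nodup keys
  have hnA : dA.keys.Nodup := by rw [hkA]; exact PySem.Set.nodup_ofList all
  have hn2 : d2.keys.Nodup := by rw [hk2]; exact PySem.Set.nodup_ofList all
  -- contains of the intermediate dicts
  have hc0 : ∀ k, d0.contains k = decide (k ∈ all) := by
    intro k
    rw [PySem.Dict.contains_eq_decide_mem_keys, hk0]
    simp [PySem.Set.mem_ofList]
  have hc1 : ∀ k, d1.contains k = decide (k ∈ all) := by
    intro k; rw [hd1, contains_pvUpd_foldl, hc0]
  -- getD agree
  have hgA : ∀ k, dA.getD k "" = if k ∈ all then pvVal ab k else "" := by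
    intro k; rw [hdA, getD_foldl_insert_fun]; simp
  have hg0 : ∀ k, d0.getD k "" = if k ∈ all then "not_available" else "" := by
    intro k; rw [hd0, getD_foldl_insert_fun (fun _ => "not_available")]; simp
  have hg2 : ∀ k, d2.getD k "" = dA.getD k "" := by
    intro k
    rw [hd2, getD_pvUpd_foldl, hd1, getD_pvUpd_foldl, hgA, hg0, hc1, hc0]
    simp only [PySem.Set.mem_ofList, pvVal, decide_eq_true_eq]
    by_cases h1 : k ∈ pvCompleted <;> by_cases h2 : k ∈ ab <;>
      by_cases h3 : k ∈ all <;> simp [h1, h2, h3]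
  -- items agree
  rw [PySem.Dict.items_eq_map_keys dA hnA "", PySem.Dict.items_eq_map_keys d2 hn2 "",
    hkA, hk2]
  exact (List.map_congr_left (fun k _ => by rw [hg2 k])).symm
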